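-- pv_equiv track=rewrite | github.com/TigistW/CompetitiveProgramming | 779-k-th-symbol-in-grammar/779-k-th-symbol-in-grammar.py | kthGrammar
-- ===== SOURCE A (Python) =====
-- def kthGrammar(n: int, k: int) -> int:
--     def bitts(n):
--         res = 0
--         while n:
--             n &= n - 1
--             res += 1
--         return res
--     return bitts(k-1) % 2
-- ===== SOURCE B (Python) =====
-- def kthGrammar(n: int, k: int) -> int:
--     if k == 1:
--         return 0
--     parent = kthGrammar(n - 1, (k + 1) // 2)
--     return parent if k % 2 == 1 else 1 - parent
-- ===== Notes on version B (the rewrite author's own statement) =====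
-- stated objective: alternative
-- what changed: Replaces the popcount-of-(k-1)-mod-2 bit loop with the classic top-down recursion on the grammar tree: recurse to the parent symbol at position (k+1)//2 and flip it when k is even (right child), no bit operations at all.
import Mathlib
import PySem

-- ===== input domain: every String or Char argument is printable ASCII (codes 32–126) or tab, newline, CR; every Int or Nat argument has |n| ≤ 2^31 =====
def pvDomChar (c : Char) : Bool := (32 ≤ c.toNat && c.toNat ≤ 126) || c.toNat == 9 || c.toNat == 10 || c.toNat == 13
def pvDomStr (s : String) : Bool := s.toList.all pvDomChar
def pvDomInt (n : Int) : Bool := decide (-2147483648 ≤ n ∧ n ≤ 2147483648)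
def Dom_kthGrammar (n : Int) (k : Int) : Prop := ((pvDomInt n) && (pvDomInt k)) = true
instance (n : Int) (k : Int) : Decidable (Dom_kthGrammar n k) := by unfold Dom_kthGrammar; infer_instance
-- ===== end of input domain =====

-- B replaces A's popcount(k-1) % 2 bit loop by the classic top-down recursion on the
-- grammar tree (parent at (k+1)//2, flip when k is even) — objective: alternative.

-- ===== PORT A =====
-- inner helper 'bitts': while n: n &= n-1; res += 1.  On Pre_ (k ≥ 1) the argument k-1 is
-- nonnegative, so the state lives in Nat ((k-1).toNat is exact there); for k-1 < 0 the
-- Python loop never ends.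
def bittsA (m : Nat) : Nat :=
  if _h : m = 0 then 0 else bittsA (m &&& (m - 1)) + 1
decreasing_by exact Nat.lt_of_le_of_lt Nat.and_le_right (by omega)

def kthGrammar (n : Int) (k : Int) : Int :=
  Int.ofNat (bittsA (k - 1).toNat % 2)

-- ===== PORT B =====
-- if k == 1: return 0; parent = kthGrammar(n-1, (k+1)//2); return parent if k odd else 1 - parent.
-- On Pre_ (k ≥ 1) the position k lives in Nat (k.toNat is exact there); for k ≤ 0 the
-- Python recursion never reaches the base case (RecursionError).
def recB (n : Int) (k : Nat) : Int :=
  if _h : k ≤ 1 then 0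
  else
    let parent := recB (n - 1) ((k + 1) / 2)
    if k % 2 = 1 then parent else 1 - parent
decreasing_by omega

def kthGrammar_alt (n : Int) (k : Int) : Int := recB n k.toNat

-- ===== PRECONDITION & SPEC =====
-- Pre_ excludes k ≤ 0, on which A's 'while n' loop on the negative int k-1 never terminates
-- (and B's recursion never reaches its base case), so A returns on exactly the admitted inputs.
def Pre_kthGrammar (n : Int) (k : Int) : Prop := 1 ≤ k
instance (n : Int) (k : Int) : Decidable (Pre_kthGrammar n k) := by unfold Pre_kthGrammar; infer_instance
def pvWitness_kthGrammar : Int × Int := (1, 5)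

def Spec_kthGrammar (n : Int) (k : Int) (out : Int) : Prop := out = kthGrammar_alt n k
instance (n : Int) (k : Int) (out : Int) : Decidable (Spec_kthGrammar n k out) := by unfold Spec_kthGrammar; infer_instance

-- ===== CLAIM (what is proved, stated in full; the proofs are below) =====
def Claim_equal_kthGrammar : Prop := ∀ (n : Int) (k : Int), Dom_kthGrammar n k → Pre_kthGrammar n k → Spec_kthGrammar n k (kthGrammar n k)

-- ===== LEMMAS AND PROOFS =====

-- reference popcount by binary recursion, used only in the proofs
def P2 (m : Nat) : Nat :=
  if _h : m = 0 then 0 else m % 2 + P2 (m / 2)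
decreasing_by omega

theorem P2_two_mul (q : Nat) : P2 (2 * q) = P2 q := by
  rcases Nat.eq_zero_or_pos q with h | h
  · simp [h]
  · rw [P2]; simp only [Nat.mul_mod_right]
    have h2 : 2 * q / 2 = q := by omega
    rw [h2]; simp [Nat.ne_of_gt (by omega : 0 < 2 * q)]

theorem P2_two_mul_add_one (q : Nat) : P2 (2 * q + 1) = P2 q + 1 := by
  rw [P2]
  have h1 : (2 * q + 1) % 2 = 1 := by omega
  have h2 : (2 * q + 1) / 2 = q := by omega
  simp [h1, h2]; omega

theorem land_odd (q : Nat) : (2 * q + 1) &&& (2 * q) = 2 * q := by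
  apply Nat.eq_of_testBit_eq; intro i
  cases i with
  | zero =>
    rw [Nat.testBit_and, Nat.testBit_zero, Nat.testBit_zero]
    have : (2 * q) % 2 = 0 := by omega
    simp [this]
  | succ j =>
    have h1 : (2 * q + 1) / 2 = q := by omega
    have h2 : 2 * q / 2 = q := by omega
    rw [Nat.testBit_and, Nat.testBit_succ, Nat.testBit_succ, h1, h2, Bool.and_self]

theorem land_even (q : Nat) (hq : 0 < q) : (2 * q) &&& (2 * q - 1) = 2 * (q &&& (q - 1)) := by
  apply Nat.eq_of_testBit_eq; intro i
  cases i with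
  | zero =>
    rw [Nat.testBit_and, Nat.testBit_zero, Nat.testBit_zero, Nat.testBit_zero]
    have h1 : (2 * q) % 2 = 0 := by omega
    have h2 : (2 * (q &&& (q - 1))) % 2 = 0 := by omega
    simp [h1, h2]
  | succ j =>
    have h1 : 2 * q / 2 = q := by omega
    have h2 : (2 * q - 1) / 2 = q - 1 := by omega
    have h3 : 2 * (q &&& (q - 1)) / 2 = q &&& (q - 1) := by omega
    rw [Nat.testBit_and, Nat.testBit_succ, Nat.testBit_succ, h1, h2,
        Nat.testBit_succ, h3, Nat.testBit_and]

theorem land_pred_lt (m : Nat) (h : 0 < m) : m &&& (m - 1) < m :=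
  Nat.lt_of_le_of_lt Nat.and_le_right (by omega)

-- Kernighan's step drops the count by exactly one
theorem P2_land_pred (m : Nat) (h : 0 < m) : P2 m = P2 (m &&& (m - 1)) + 1 := by
  induction m using Nat.strong_induction_on with
  | _ m ih =>
    rcases Nat.even_or_odd m with ⟨q, hq⟩ | ⟨q, hq⟩
    · have hm : m = 2 * q := by omega
      have hqpos : 0 < q := by omega
      subst hm
      rw [land_even q hqpos, P2_two_mul, P2_two_mul, ih q (by omega) hqpos]
    · have hm : m = 2 * q + 1 := by omega
      subst hm
      have hpred : 2 * q + 1 - 1 = 2 * q := by omega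
      rw [hpred, land_odd, P2_two_mul_add_one, P2_two_mul]

theorem bittsA_eq_P2 (m : Nat) : bittsA m = P2 m := by
  induction m using Nat.strong_induction_on with
  | _ m ih =>
    rcases Nat.eq_zero_or_pos m with h | h
    · subst h; rw [bittsA, P2]; simp
    · rw [bittsA]
      simp only [dif_neg (by omega : ¬ m = 0)]
      rw [ih _ (land_pred_lt m h), ← P2_land_pred m h]

-- B's tree recursion computes the popcount parity of k-1
theorem recB_eq (n : Int) (k : Nat) (hk : 1 ≤ k) :
    recB n k = Int.ofNat (P2 (k - 1) % 2) := by
  induction k using Nat.strong_induction_on generalizing n with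
  | _ k ih =>
    rw [recB]
    by_cases h1 : k ≤ 1
    · have : k = 1 := by omega
      subst this
      simp [P2]
    · simp only [dif_neg h1]
      have hparent : 1 ≤ (k + 1) / 2 := by omega
      rw [ih ((k + 1) / 2) (by omega) (n - 1) hparent]
      rcases Nat.even_or_odd k with ⟨q, hq⟩ | ⟨q, hq⟩
      · -- k even: k-1 = 2(q-1)+1, parent-1 = q-1, parity flips (right child)
        have hmod : ¬ (k % 2 = 1) := by omega
        have hp : (k + 1) / 2 - 1 = q - 1 := by omega
        have hk1 : k - 1 = 2 * (q - 1) + 1 := by omega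
        rw [if_neg hmod, hp, hk1, P2_two_mul_add_one]
        simp only [Int.ofNat_eq_natCast]
        omega
      · -- k odd: k-1 = 2q, parent-1 = q, same parity (left child)
        have hmod : k % 2 = 1 := by omega
        have hp : (k + 1) / 2 - 1 = q := by omega
        have hk1 : k - 1 = 2 * q := by omega
        rw [if_pos hmod, hp, hk1, P2_two_mul]
-- ===== VERDICT (by name: the statement is the Claim_ definition above) =====
theorem kthGrammar_spec : Claim_equal_kthGrammar := by
  intro n k _ hk
  unfold Pre_kthGrammar at hk
  unfold Spec_kthGrammar kthGrammar kthGrammar_alt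
  have harg : (k - 1).toNat = k.toNat - 1 := by omega
  rw [bittsA_eq_P2, recB_eq n k.toNat (by omega), harg]
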